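-- pv_equiv track=rewrite | github.com/billykoech137/Python-Practice-Repo | tic_tac_toe_rows_cols.py | get_row_col
-- ===== SOURCE A (Python) =====
-- def get_row_col(s):
--     row = {"1": 0, "2": 1, "3": 2}
--     col = {"A": 0, "B": 1, "C": 2}
--
--     lc = []
--     for i in s:
--         if i in row.keys():
--             lc.append(row[i])
--
--     for i in s:
--         if i in col.keys():
--             lc.append(col[i])
--
--     tc = tuple(lc)
--
--     return tc
-- ===== SOURCE B (Python) =====
-- def get_row_col(s):
--     rows = []
--     cols = []
--     for ch in s:
--         if ch == "1":
--             rows.append(0)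
--         elif ch == "2":
--             rows.append(1)
--         elif ch == "3":
--             rows.append(2)
--         elif ch == "A":
--             cols.append(0)
--         elif ch == "B":
--             cols.append(1)
--         elif ch == "C":
--             cols.append(2)
--     return tuple(rows + cols)
-- ===== Notes on version B (the rewrite author's own statement) =====
-- stated objective: alternative
-- what changed: A scans the string twice (rows pass, then cols pass) with dict lookups; B makes a single pass maintaining two accumulators (rows and cols) and concatenates them at the end.
import Mathlib
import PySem

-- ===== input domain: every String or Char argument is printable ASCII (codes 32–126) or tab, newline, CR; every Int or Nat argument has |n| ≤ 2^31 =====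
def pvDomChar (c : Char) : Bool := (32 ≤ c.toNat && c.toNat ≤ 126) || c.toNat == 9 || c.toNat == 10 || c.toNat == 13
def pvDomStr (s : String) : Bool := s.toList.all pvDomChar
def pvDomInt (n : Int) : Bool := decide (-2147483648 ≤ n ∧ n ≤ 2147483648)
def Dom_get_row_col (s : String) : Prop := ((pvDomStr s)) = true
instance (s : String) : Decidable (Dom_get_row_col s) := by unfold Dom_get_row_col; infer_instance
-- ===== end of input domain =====

-- B replaces A's two sequential scans of s (rows, then cols) by one scan with two accumulators; same return value (objective: alternative decomposition).

-- ===== PORT A =====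
def pvRowDict : PySem.Dict Char Int := PySem.Dict.ofList [('1', 0), ('2', 1), ('3', 2)]
def pvColDict : PySem.Dict Char Int := PySem.Dict.ofList [('A', 0), ('B', 1), ('C', 2)]

def get_row_col (s : String) : List Int :=
  let lc : List Int := []
  let lc := s.toList.foldl (fun lc i =>
    if (pvRowDict.contains i) then lc ++ [pvRowDict.getD i 0] else lc) lc
  let lc := s.toList.foldl (fun lc i =>
    if (pvColDict.contains i) then lc ++ [pvColDict.getD i 0] else lc) lc
  lc

-- ===== PORT B =====
def get_row_col_alt (s : String) : List Int :=
  let rc := s.toList.foldl (fun (rc : List Int × List Int) ch =>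
    if ch = '1' then (rc.1 ++ [0], rc.2)
    else if ch = '2' then (rc.1 ++ [1], rc.2)
    else if ch = '3' then (rc.1 ++ [2], rc.2)
    else if ch = 'A' then (rc.1, rc.2 ++ [0])
    else if ch = 'B' then (rc.1, rc.2 ++ [1])
    else if ch = 'C' then (rc.1, rc.2 ++ [2])
    else rc) ([], [])
  rc.1 ++ rc.2

-- ===== PRECONDITION & SPEC =====
def Spec_get_row_col (s : String) (out : List Int) : Prop := out = get_row_col_alt s
instance (s : String) (out : List Int) : Decidable (Spec_get_row_col s out) := by unfold Spec_get_row_col; infer_instance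

-- ===== CLAIM (what is proved, stated in full; the proofs are below) =====
def Claim_equal_get_row_col : Prop := ∀ (s : String), Dom_get_row_col s → Spec_get_row_col s (get_row_col s)

-- ===== LEMMAS AND PROOFS =====

def pvRowF (c : Char) : Option Int :=
  if c = '1' then some 0 else if c = '2' then some 1 else if c = '3' then some 2 else none
def pvColF (c : Char) : Option Int :=
  if c = 'A' then some 0 else if c = 'B' then some 1 else if c = 'C' then some 2 else none

theorem pvRow_step (acc : List Int) (c : Char) :
    (if (pvRowDict.contains c) then acc ++ [pvRowDict.getD c 0] else acc)
      = acc ++ (pvRowF c).toList := by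
  by_cases h1 : c = '1'
  · subst h1
    simp [pvRowF, show pvRowDict.contains '1' = true from by decide,
      show pvRowDict.getD '1' 0 = 0 from by decide]
  · by_cases h2 : c = '2'
    · subst h2
      simp [pvRowF, show pvRowDict.contains '2' = true from by decide,
        show pvRowDict.getD '2' 0 = 1 from by decide]
    · by_cases h3 : c = '3'
      · subst h3
        simp [pvRowF, show pvRowDict.contains '3' = true from by decide,
          show pvRowDict.getD '3' 0 = 2 from by decide]
      · have hc : pvRowDict.contains c = false := by
          simp [PySem.Dict.contains, show pvRowDict.items = [('1', (0:Int)), ('2', 2-1), ('3', 2)] from by decide]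
          exact ⟨fun h => h1 h.symm, fun h => h2 h.symm, fun h => h3 h.symm⟩
        simp [pvRowF, hc, h1, h2, h3]

theorem pvCol_step (acc : List Int) (c : Char) :
    (if (pvColDict.contains c) then acc ++ [pvColDict.getD c 0] else acc)
      = acc ++ (pvColF c).toList := by
  by_cases h1 : c = 'A'
  · subst h1
    simp [pvColF, show pvColDict.contains 'A' = true from by decide,
      show pvColDict.getD 'A' 0 = 0 from by decide]
  · by_cases h2 : c = 'B'
    · subst h2
      simp [pvColF, show pvColDict.contains 'B' = true from by decide,
        show pvColDict.getD 'B' 0 = 1 from by decide]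
    · by_cases h3 : c = 'C'
      · subst h3
        simp [pvColF, show pvColDict.contains 'C' = true from by decide,
          show pvColDict.getD 'C' 0 = 2 from by decide]
      · have hc : pvColDict.contains c = false := by
          simp [PySem.Dict.contains, show pvColDict.items = [('A', (0:Int)), ('B', 2-1), ('C', 2)] from by decide]
          exact ⟨fun h => h1 h.symm, fun h => h2 h.symm, fun h => h3 h.symm⟩
        simp [pvColF, hc, h1, h2, h3]

theorem pvA_row_fold (l : List Char) (acc : List Int) :
    l.foldl (fun lc i => if (pvRowDict.contains i) then lc ++ [pvRowDict.getD i 0] else lc) acc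
      = acc ++ l.filterMap pvRowF := by
  induction l generalizing acc with
  | nil => simp
  | cons c t ih =>
    rw [List.foldl_cons, pvRow_step, ih]
    cases hr : pvRowF c <;> simp [hr]

theorem pvA_col_fold (l : List Char) (acc : List Int) :
    l.foldl (fun lc i => if (pvColDict.contains i) then lc ++ [pvColDict.getD i 0] else lc) acc
      = acc ++ l.filterMap pvColF := by
  induction l generalizing acc with
  | nil => simp
  | cons c t ih =>
    rw [List.foldl_cons, pvCol_step, ih]
    cases hr : pvColF c <;> simp [hr]

theorem pvB_step (rc : List Int × List Int) (ch : Char) :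
    (if ch = '1' then (rc.1 ++ [0], rc.2)
      else if ch = '2' then (rc.1 ++ [1], rc.2)
      else if ch = '3' then (rc.1 ++ [2], rc.2)
      else if ch = 'A' then (rc.1, rc.2 ++ [0])
      else if ch = 'B' then (rc.1, rc.2 ++ [1])
      else if ch = 'C' then (rc.1, rc.2 ++ [2])
      else rc)
      = (rc.1 ++ (pvRowF ch).toList, rc.2 ++ (pvColF ch).toList) := by
  by_cases h1 : ch = '1' <;> by_cases h2 : ch = '2' <;> by_cases h3 : ch = '3' <;>
    by_cases h4 : ch = 'A' <;> by_cases h5 : ch = 'B' <;> by_cases h6 : ch = 'C' <;>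
    simp_all [pvRowF, pvColF]

theorem pvB_fold (l : List Char) (r c : List Int) :
    l.foldl (fun (rc : List Int × List Int) ch =>
      if ch = '1' then (rc.1 ++ [0], rc.2)
      else if ch = '2' then (rc.1 ++ [1], rc.2)
      else if ch = '3' then (rc.1 ++ [2], rc.2)
      else if ch = 'A' then (rc.1, rc.2 ++ [0])
      else if ch = 'B' then (rc.1, rc.2 ++ [1])
      else if ch = 'C' then (rc.1, rc.2 ++ [2])
      else rc) (r, c)
      = (r ++ l.filterMap pvRowF, c ++ l.filterMap pvColF) := by
  induction l generalizing r c with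
  | nil => simp
  | cons ch t ih =>
    rw [List.foldl_cons, pvB_step, ih]
    cases hr : pvRowF ch <;> cases hc : pvColF ch <;>
      simp [hr, hc]

-- ===== VERDICT (by name: the statement is the Claim_ definition above) =====
theorem get_row_col_spec : Claim_equal_get_row_col := by
  intro s _
  unfold Spec_get_row_col get_row_col get_row_col_alt
  simp only [pvA_row_fold, pvA_col_fold, pvB_fold, List.nil_append]
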